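-- pv_equiv track=rewrite | github.com/Caprica-XIV/EDMC-C14-Explorer | elements/C14Biomes.py | get_short
-- ===== SOURCE A (Python) =====
-- def get_short(name: str) -> str:
--     """ découpe un nom de planète pour ressortir juste les derniers identifiant """
--     split=name.split(' ')
--     short=''
--     for i in range(len(split)-1, 0, -1):
--         short = split[i] + short
--         if split[i] in '0123456789':
--             break
--     return short
-- ===== SOURCE B (Python) =====
-- def get_short(name: str) -> str:
--     """ découpe un nom de planète pour ressortir juste les derniers identifiant """
--     rev = name.split(' ')[1:][::-1]
--     keep = next((i + 1 for i, t in enumerate(rev) if t in '0123456789'), len(rev))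
--     return ''.join(rev[:keep][::-1])
-- ===== Notes on version B (the rewrite author's own statement) =====
-- stated objective: alternative
-- what changed: Instead of A's index loop that prepends tokens into a growing string and breaks on the digit test, B reverses the tail token list, finds how many leading reversed tokens to keep (up to and including the first digit-test hit, else all), and joins that slice re-reversed once.
import Mathlib
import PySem

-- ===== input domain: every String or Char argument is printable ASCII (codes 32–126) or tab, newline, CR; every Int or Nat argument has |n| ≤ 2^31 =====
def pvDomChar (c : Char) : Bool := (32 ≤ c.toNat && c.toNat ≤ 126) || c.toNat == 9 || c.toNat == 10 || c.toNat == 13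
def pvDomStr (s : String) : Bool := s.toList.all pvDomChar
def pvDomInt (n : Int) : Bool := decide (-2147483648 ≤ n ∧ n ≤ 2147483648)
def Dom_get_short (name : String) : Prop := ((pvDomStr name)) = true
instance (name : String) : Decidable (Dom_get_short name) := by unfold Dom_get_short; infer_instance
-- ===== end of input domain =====

-- B reverses the tail token list, counts how many reversed tokens to keep (through the first digit-test hit), and joins that slice once, instead of A's prepend-and-break accumulation; objective: alternative.


-- ===== PORT A =====
-- the literal '0123456789' as code points
def pvDigits : List Char := ['0','1','2','3','4','5','6','7','8','9']

-- the for-loop of A: iterate over the (descending) index list, prepend split[i], break on the substring test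
def getShortGo (split : List (List Char)) : List Int → List Char → List Char
  | [], short => short
  | i :: rest, short =>
    let tok := (PySem.List.pyGet? split i).getD []
    let short' := tok ++ short
    if PySem.Chars.isIn tok pvDigits then short'
    else getShortGo split rest short'

def get_short (name : String) : String :=
  let split := PySem.Chars.splitOn name.toList [' ']
  String.mk (getShortGo split (PySem.List.pyRange ((split.length : Int) - 1) 0 (-1)) [])

-- ===== PORT B =====
-- B's 'next((i+1 for i,t in enumerate(rev) if t in digits), len(rev))'
def keepOf (rev : List (List Char)) : Nat :=
  match rev.findIdx? (fun t => PySem.Chars.isIn t pvDigits) with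
  | some i => i + 1
  | none => rev.length

def get_short_alt (name : String) : String :=
  let rev := (PySem.List.slice (PySem.Chars.splitOn name.toList [' ']) (some 1) none).reverse
  String.mk (PySem.Chars.join [] ((rev.take (keepOf rev)).reverse))

-- ===== PRECONDITION & SPEC =====
def Spec_get_short (name : String) (out : String) : Prop := out = get_short_alt name
instance (name : String) (out : String) : Decidable (Spec_get_short name out) := by unfold Spec_get_short; infer_instance

-- ===== CLAIM (what is proved, stated in full; the proofs are below) =====
def Claim_equal_get_short : Prop := ∀ (name : String), Dom_get_short name → Spec_get_short name (get_short name)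

-- ===== LEMMAS AND PROOFS =====

-- proof-only helper: the boundary index effectively produced by A's loop
def findBoundaryGo (split : List (List Char)) : List Int → Int
  | [] => 1
  | j :: rest =>
    if PySem.Chars.isIn ((PySem.List.pyGet? split j).getD []) pvDigits then j
    else findBoundaryGo split rest

lemma pyRange_down (a : Int) :
    PySem.List.pyRange a 0 (-1) = (List.range a.toNat).map (fun j : Nat => a - (j : Int)) := by
  unfold PySem.List.pyRange
  rw [if_neg (by norm_num)]
  by_cases h : 0 < a
  · rw [if_neg (by norm_num), if_pos h]
    have : (a - 0 + - -1 - 1) / - -1 = a := by norm_num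
    rw [this]
    apply List.map_congr_left
    intro j _
    ring
  · have h0 : a.toNat = 0 := by omega
    rw [if_neg (by norm_num), if_neg h, h0]
    simp

lemma pyRange_down_succ (k : Nat) :
    PySem.List.pyRange ((k : Int) + 1) 0 (-1) = ((k : Int) + 1) :: PySem.List.pyRange (k : Int) 0 (-1) := by
  rw [pyRange_down, pyRange_down]
  have h1 : ((k : Int) + 1).toNat = k + 1 := by omega
  have h2 : ((k : Int)).toNat = k := by omega
  rw [h1, h2, List.range_succ_eq_map]
  simp only [List.map_cons, List.map_map, List.cons.injEq]
  constructor
  · push_cast; ring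
  · apply List.map_congr_left
    intro j _
    simp only [Function.comp]
    push_cast; ring

lemma mem_pyRange_down {k : Nat} {x : Int} (hx : x ∈ PySem.List.pyRange (k : Int) 0 (-1)) :
    1 ≤ x ∧ x ≤ (k : Int) := by
  rw [pyRange_down] at hx
  simp only [List.mem_map, List.mem_range] at hx
  obtain ⟨j, hj, rfl⟩ := hx
  rw [Int.toNat_natCast] at hj
  omega

lemma findBoundary_cases (split : List (List Char)) (idxs : List Int) :
    findBoundaryGo split idxs = 1 ∨ findBoundaryGo split idxs ∈ idxs := by
  induction idxs with
  | nil => left; rfl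
  | cons j rest ih =>
    simp only [findBoundaryGo]
    split_ifs
    · right; exact List.mem_cons_self
    · rcases ih with h | h
      · left; exact h
      · right; exact List.mem_cons_of_mem _ h

lemma findBoundary_bounds (split : List (List Char)) (k : Nat) :
    1 ≤ findBoundaryGo split (PySem.List.pyRange (k : Int) 0 (-1)) ∧
    findBoundaryGo split (PySem.List.pyRange (k : Int) 0 (-1)) ≤ max 1 (k : Int) := by
  rcases findBoundary_cases split (PySem.List.pyRange (k : Int) 0 (-1)) with h | h
  · rw [h]; omega
  · have := mem_pyRange_down h
    omega

lemma join_nil_cons (p : List Char) (ps : List (List Char)) :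
    PySem.Chars.join [] (p :: ps) = p ++ PySem.Chars.join [] ps := by
  cases ps with
  | nil => simp [PySem.Chars.join_singleton, PySem.Chars.join_nil]
  | cons q rest => rw [PySem.Chars.join_cons_cons]; simp

lemma join_nil_append (xs ys : List (List Char)) :
    PySem.Chars.join [] (xs ++ ys) = PySem.Chars.join [] xs ++ PySem.Chars.join [] ys := by
  induction xs with
  | nil => simp [PySem.Chars.join_nil]
  | cons p rest ih => rw [List.cons_append, join_nil_cons, join_nil_cons, ih, List.append_assoc]

lemma loop_eq_join (split : List (List Char)) (k : Nat) (hk : k < split.length) (short : List Char) :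
    getShortGo split (PySem.List.pyRange (k : Int) 0 (-1)) short
      = PySem.Chars.join []
          ((split.take (k + 1)).drop (findBoundaryGo split (PySem.List.pyRange (k : Int) 0 (-1))).toNat)
        ++ short := by
  induction k generalizing short with
  | zero =>
    have h0 : PySem.List.pyRange (((0:Nat) : Int)) 0 (-1) = [] := by rw [pyRange_down]; simp
    rw [h0]
    simp [getShortGo, findBoundaryGo, PySem.Chars.join_nil]
  | succ k ih =>
    have hcons := pyRange_down_succ k
    have hget : (PySem.List.pyGet? split ((k : Int) + 1)).getD [] = split.getD (k + 1) [] := by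
      have : ((k : Int) + 1) = ((k + 1 : Nat) : Int) := by push_cast; ring
      rw [this, PySem.List.pyGet?_natCast]
      simp [List.getD, List.getElem?_eq_getElem hk]
    have htake : split.take (k + 2) = split.take (k + 1) ++ [split.getD (k + 1) []] := by
      rw [List.take_succ]
      simp [List.getElem?_eq_getElem hk, List.getD]
    push_cast
    rw [hcons]
    simp only [getShortGo, findBoundaryGo, hget]
    split_ifs with hdig
    · have : ((k : Int) + 1).toNat = k + 1 := by omega
      rw [this, htake]
      rw [List.drop_append_of_le_length (by simp [List.length_take]; omega)]
      have hdt : List.drop (k+1) (List.take (k+1) split) = [] := by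
        apply List.drop_eq_nil_of_le
        simp [List.length_take]
      rw [hdt, List.nil_append, PySem.Chars.join_singleton]
    · have hk' : k < split.length := by omega
      rw [ih hk']
      set j := findBoundaryGo split (PySem.List.pyRange (k : Int) 0 (-1)) with hj
      have hjb := findBoundary_bounds split k
      rw [← hj] at hjb
      have hjle : j.toNat ≤ k + 1 := by omega
      rw [htake, List.drop_append_of_le_length (by simp [List.length_take]; omega)]
      rw [join_nil_append, join_nil_cons, PySem.Chars.join_nil]
      simp [List.append_assoc]

-- the boundary test only looks at indices inside the shorter list, so an appended element is invisible
lemma findBoundaryGo_append (split' : List (List Char)) (r : List Char) (idxs : List Int)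
    (h : ∀ x ∈ idxs, 0 ≤ x ∧ x < (split'.length : Int)) :
    findBoundaryGo (split' ++ [r]) idxs = findBoundaryGo split' idxs := by
  induction idxs with
  | nil => rfl
  | cons j rest ih =>
    have hj := h j List.mem_cons_self
    have hget : PySem.List.pyGet? (split' ++ [r]) j = PySem.List.pyGet? split' j := by
      have hjn : j = (j.toNat : Int) := by omega
      rw [hjn, PySem.List.pyGet?_natCast, PySem.List.pyGet?_natCast]
      rw [List.getElem?_append_left (by omega)]
    simp only [findBoundaryGo, hget]
    split_ifs
    · rfl
    · exact ih (fun x hx => h x (List.mem_cons_of_mem _ hx))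

-- correspondence: A's drop-from-boundary equals B's reversed kept prefix of the reversed tail
lemma corr (s0 : List Char) (rev : List (List Char)) :
    (s0 :: rev.reverse).drop
        (findBoundaryGo (s0 :: rev.reverse) (PySem.List.pyRange ((rev.length : Int)) 0 (-1))).toNat
      = (rev.take (keepOf rev)).reverse := by
  induction rev with
  | nil =>
    simp only [List.reverse_nil, List.length_nil, Nat.cast_zero]
    rw [pyRange_down]
    simp [findBoundaryGo, keepOf]
  | cons r rev' ih =>
    have hlen : ((r :: rev').length : Int) = ((rev'.length : Int)) + 1 := by push_cast [List.length_cons]; ring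
    have hsplit : s0 :: (r :: rev').reverse = (s0 :: rev'.reverse) ++ [r] := by simp
    have hget : (PySem.List.pyGet? ((s0 :: rev'.reverse) ++ [r]) ((rev'.length : Int) + 1)).getD [] = r := by
      have : ((rev'.length : Int) + 1) = ((rev'.length + 1 : Nat) : Int) := by push_cast; ring
      rw [this, PySem.List.pyGet?_natCast]
      have hl : (s0 :: rev'.reverse).length = rev'.length + 1 := by simp
      rw [List.getElem?_append_right (by omega)]
      simp [hl]
    rw [hlen, hsplit, pyRange_down_succ]
    simp only [findBoundaryGo, hget]
    split_ifs with hdig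
    · have ht : ((rev'.length : Int) + 1).toNat = rev'.length + 1 := by omega
      rw [ht]
      have hl : (s0 :: rev'.reverse).length = rev'.length + 1 := by simp
      rw [List.drop_append_of_le_length (by omega), List.drop_eq_nil_of_le (by omega), List.nil_append]
      simp [keepOf, List.findIdx?_cons, hdig]
    · rw [findBoundaryGo_append _ _ _ (by
        intro x hx
        have := mem_pyRange_down hx
        simp only [List.length_cons, List.length_reverse]
        omega)]
      set j := findBoundaryGo (s0 :: rev'.reverse) (PySem.List.pyRange ((rev'.length : Int)) 0 (-1)) with hj
      have hjb := findBoundary_bounds (s0 :: rev'.reverse) rev'.length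
      rw [← hj] at hjb
      have hl : (s0 :: rev'.reverse).length = rev'.length + 1 := by simp
      rw [List.drop_append_of_le_length (by omega), ih]
      have hkeep : keepOf (r :: rev') = keepOf rev' + 1 := by
        unfold keepOf
        rw [List.findIdx?_cons, if_neg (by simp [hdig])]
        cases h : List.findIdx? (fun t => PySem.Chars.isIn t pvDigits) rev' <;> simp
      rw [hkeep]
      simp

-- ===== VERDICT (by name: the statement is the Claim_ definition above) =====
theorem get_short_spec : Claim_equal_get_short := by
  intro name _
  unfold Spec_get_short get_short get_short_alt
  cases hsp : PySem.Chars.splitOn name.toList [' '] with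
  | nil => simp [getShortGo, keepOf, PySem.Chars.join_nil, PySem.List.slice_from_one]
  | cons s0 ts =>
    simp only [PySem.List.slice_from_one, List.tail_cons]
    have hlen : ((s0 :: ts).length : Int) - 1 = ((ts.length : Nat) : Int) := by simp
    rw [hlen, loop_eq_join _ ts.length (by simp) []]
    have hc := corr s0 ts.reverse
    rw [List.reverse_reverse, List.length_reverse] at hc
    rw [List.append_nil]
    have ht : (s0 :: ts).take (ts.length + 1) = s0 :: ts := by
      rw [List.take_of_length_le (by simp)]
    rw [ht, hc]
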